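-- pv_equiv track=rewrite | github.com/JamieAGraham/Heckmeck | players.py | choose_dice
-- ===== SOURCE A (Python) =====
-- def choose_dice(roll):
--     counts = {die: roll.count(die) for die in set(roll)}
--     if 'worm' in counts:
--         return ['worm'] * counts['worm']
--     if counts:
--         max_val = max(die for die in counts if die != 'worm')
--         return [max_val] * counts[max_val]
--     return None
-- ===== SOURCE B (Python) =====
-- def _better(d, b):
--     return (d == 'worm' and b != 'worm') or (b != 'worm' and d > b)
--
-- def choose_dice(roll):
--     best = None
--     count = 0
--     for die in roll:
--         if best is None or _better(die, best):
--             best, count = die, 1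
--         elif die == best:
--             count += 1
--     if best is None:
--         return None
--     return [best] * count
-- ===== Notes on version B (the rewrite author's own statement) =====
-- stated objective: faster
-- what changed: B replaces A's staged set/dict-of-counts (roll.count called once per distinct die) plus a max over the distinct dice by a single left-to-right pass holding a running (best, count) accumulator: each die either dethrones the current best (worm outranks everything, otherwise string comparison), increments its count, or is dropped; no counts dict or distinct-set is ever built.
import Mathlib
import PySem

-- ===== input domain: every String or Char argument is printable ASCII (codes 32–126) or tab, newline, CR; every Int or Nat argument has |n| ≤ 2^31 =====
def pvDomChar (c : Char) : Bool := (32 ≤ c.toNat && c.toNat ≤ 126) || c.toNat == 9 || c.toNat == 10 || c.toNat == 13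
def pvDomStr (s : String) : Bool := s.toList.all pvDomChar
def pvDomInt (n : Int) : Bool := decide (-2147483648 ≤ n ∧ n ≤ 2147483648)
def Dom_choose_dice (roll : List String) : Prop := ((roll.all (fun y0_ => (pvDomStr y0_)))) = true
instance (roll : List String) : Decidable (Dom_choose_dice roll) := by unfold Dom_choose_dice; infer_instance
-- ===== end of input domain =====

-- B replaces A's set/dict-of-counts plus max over the distinct dice by a single pass with a running (best, count) accumulator (alternative decomposition, same result).

-- ===== PORT A =====
def choose_dice (roll : List String) : Option (List String) :=
  -- counts = {die: roll.count(die) for die in set(roll)}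
  let counts : PySem.Dict String Int :=
    (PySem.Set.ofList roll).foldl
      (fun d die => d.insert die (PySem.List.count roll die : Int)) PySem.Dict.empty
  if counts.contains "worm" then
    some (PySem.List.pyRepeat ["worm"] (counts.getD "worm" 0))
  else if counts.size ≠ 0 then
    match PySem.List.max? (counts.keys.filter (fun die => die != "worm")) (fun x => x) with
    | some max_val => some (PySem.List.pyRepeat [max_val] (counts.getD max_val 0))
    | none => none   -- ValueError on an empty generator; unreachable (the worm branch returned)
  else
    none

-- ===== PORT B =====
-- _better(d, b): d dethrones the current best b
def pyBetter (d b : String) : Bool :=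
  (d == "worm" && b != "worm") || (b != "worm" && decide (b < d))

-- body of B's for-loop over (best, count)
def chooseStep (st : Option String × Int) (die : String) : Option String × Int :=
  match st with
  | (none, _) => (some die, 1)
  | (some b, c) =>
    if pyBetter die b then (some die, 1)
    else if die == b then (some b, c + 1)
    else (some b, c)

def choose_dice_alt (roll : List String) : Option (List String) :=
  match roll.foldl chooseStep (none, 0) with
  | (none, _) => none
  | (some best, count) => some (PySem.List.pyRepeat [best] count)

-- ===== PRECONDITION & SPEC =====
def Spec_choose_dice (roll : List String) (out : Option (List String)) : Prop := out = choose_dice_alt roll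
instance (roll : List String) (out : Option (List String)) : Decidable (Spec_choose_dice roll out) := by unfold Spec_choose_dice; infer_instance

-- ===== CLAIM (what is proved, stated in full; the proofs are below) =====
def Claim_equal_choose_dice : Prop := ∀ (roll : List String), Dom_choose_dice roll → Spec_choose_dice roll (choose_dice roll)

-- ===== LEMMAS AND PROOFS =====

-- common reference form both ports are reduced to
def pvMid (roll : List String) : Option (List String) :=
  if roll.isEmpty then none
  else
    some (PySem.List.pyRepeat
      [if roll.contains "worm" then "worm" else (PySem.List.max? roll (fun x => x)).getD ""]
      (PySem.List.count roll
        (if roll.contains "worm" then "worm" else (PySem.List.max? roll (fun x => x)).getD "") : Int))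

theorem pyBetter_iff (a b : String) :
    pyBetter a b = true ↔ (a = "worm" ∧ b ≠ "worm") ∨ (b ≠ "worm" ∧ b < a) := by
  simp [pyBetter]

theorem pyBetter_irrefl (a : String) : pyBetter a a = false := by
  rw [Bool.eq_false_iff]
  intro h
  rcases (pyBetter_iff a a).mp h with ⟨h1, h2⟩ | ⟨_, h2⟩
  · exact h2 h1
  · exact lt_irrefl _ h2

theorem pyBetter_trans {a b c : String} (h1 : pyBetter a b = true) (h2 : pyBetter b c = true) :
    pyBetter a c = true := by
  rcases (pyBetter_iff a b).mp h1 with ⟨ha, hb⟩ | ⟨hb, hlt⟩ <;>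
  rcases (pyBetter_iff b c).mp h2 with ⟨hb', hc⟩ | ⟨hc, hlt'⟩
  · exact absurd hb' hb
  · exact (pyBetter_iff a c).mpr (Or.inl ⟨ha, hc⟩)
  · exact absurd hb' hb
  · exact (pyBetter_iff a c).mpr (Or.inr ⟨hc, lt_trans hlt' hlt⟩)

theorem pyBetter_asym {a b : String} (h1 : pyBetter a b = true) (h2 : pyBetter b a = true) : False := by
  have h := pyBetter_trans h1 h2
  rw [pyBetter_irrefl] at h
  exact absurd h (by simp)

-- running best of B's loop, seeded with b
def pvWinner (b : String) (xs : List String) : String :=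
  xs.foldl (fun acc d => if pyBetter d acc then d else acc) b

theorem pvWinner_nil (b : String) : pvWinner b [] = b := rfl

theorem pvWinner_cons (b d : String) (xs : List String) :
    pvWinner b (d :: xs) = pvWinner (if pyBetter d b then d else b) xs := rfl

theorem pvWinner_ge (xs : List String) : ∀ b, pvWinner b xs = b ∨ pyBetter (pvWinner b xs) b = true := by
  induction xs with
  | nil => intro b; exact Or.inl rfl
  | cons d xs ih =>
    intro b
    rw [pvWinner_cons]
    by_cases h : pyBetter d b = true
    · rw [if_pos h]
      rcases ih d with h2 | h2
      · right; rw [h2]; exact h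
      · right; exact pyBetter_trans h2 h
    · rw [if_neg h]
      exact ih b

theorem pvWinner_mem (xs : List String) : ∀ b, pvWinner b xs = b ∨ pvWinner b xs ∈ xs := by
  induction xs with
  | nil => intro b; exact Or.inl rfl
  | cons d xs ih =>
    intro b
    rw [pvWinner_cons]
    by_cases h : pyBetter d b = true
    · rw [if_pos h]
      rcases ih d with h2 | h2
      · right; rw [h2]; exact List.mem_cons_self
      · right; exact List.mem_cons_of_mem _ h2
    · rw [if_neg h]
      rcases ih b with h2 | h2
      · exact Or.inl h2
      · right; exact List.mem_cons_of_mem _ h2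

-- the seed never beats the running best
theorem not_better_base (xs : List String) (b : String) : ¬ pyBetter b (pvWinner b xs) = true := by
  intro h
  rcases pvWinner_ge xs b with h2 | h2
  · rw [h2, pyBetter_irrefl] at h; exact absurd h (by simp)
  · exact pyBetter_asym h h2

-- no element of the list beats the running best
theorem not_better_mem (xs : List String) : ∀ b y, y ∈ xs → ¬ pyBetter y (pvWinner b xs) = true := by
  induction xs with
  | nil => intro b y hy; exact absurd hy List.not_mem_nil
  | cons d xs ih =>
    intro b y hy h
    rw [pvWinner_cons] at h
    by_cases hb : pyBetter d b = true
    · rw [if_pos hb] at h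
      rcases List.mem_cons.mp hy with hyd | hy2
      · subst hyd; exact not_better_base xs y h
      · exact ih d y hy2 h
    · rw [if_neg hb] at h
      rcases List.mem_cons.mp hy with hyd | hy2
      · subst hyd
        rcases pvWinner_ge xs b with h2 | h2
        · rw [h2] at h; exact hb h
        · exact hb (pyBetter_trans h h2)
      · exact ih b y hy2 h

-- the loop invariant of B's single pass
theorem foldl_chooseStep (xs : List String) :
    ∀ (m : String) (c : Int),
      xs.foldl chooseStep (some m, c) =
        (some (pvWinner m xs),
          (if pvWinner m xs = m then c else 0) + (xs.count (pvWinner m xs) : Int)) := by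
  induction xs with
  | nil => intro m c; simp [pvWinner_nil]
  | cons d xs ih =>
    intro m c
    rw [List.foldl_cons, pvWinner_cons]
    by_cases h : pyBetter d m = true
    · rw [if_pos h]
      have hstep : chooseStep (some m, c) d = (some d, 1) := by simp [chooseStep, h]
      rw [hstep, ih d 1]
      have hMm : pvWinner d xs ≠ m := by
        intro hEq
        rcases pvWinner_ge xs d with h2 | h2
        · rw [h2] at hEq; subst hEq
          rw [pyBetter_irrefl] at h; exact absurd h (by simp)
        · rw [hEq] at h2; exact pyBetter_asym h2 h
      simp only [Prod.mk.injEq, List.count_cons]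
      refine ⟨trivial, ?_⟩
      rw [if_neg hMm]
      by_cases hd : pvWinner d xs = d
      · simp [hd]; omega
      · have hd' : ¬ d = pvWinner d xs := fun hh => hd hh.symm
        simp [hd, hd']
    · rw [if_neg h]
      by_cases h2 : d = m
      · subst h2
        have hstep : chooseStep (some d, c) d = (some d, c + 1) := by simp [chooseStep, h]
        rw [hstep, ih d (c + 1)]
        simp only [Prod.mk.injEq, List.count_cons]
        refine ⟨trivial, ?_⟩
        by_cases hd : pvWinner d xs = d
        · simp [hd]; omega
        · have hd' : ¬ d = pvWinner d xs := fun hh => hd hh.symm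
          simp [hd, hd']
      · have hstep : chooseStep (some m, c) d = (some m, c) := by
          simp [chooseStep, h, h2]
        rw [hstep, ih m c]
        have hMd : pvWinner m xs ≠ d := by
          intro hEq
          rcases pvWinner_ge xs m with hg | hg
          · rw [hg] at hEq; exact h2 hEq.symm
          · rw [hEq] at hg; exact h hg
        have hMd' : ¬ d = pvWinner m xs := fun hh => hMd hh.symm
        simp only [Prod.mk.injEq, List.count_cons]
        refine ⟨trivial, ?_⟩
        simp [hMd']

-- B's pass computes pvMid
theorem alt_eq_mid (roll : List String) : choose_dice_alt roll = pvMid roll := by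
  cases roll with
  | nil => rfl
  | cons x xs =>
    have hmemc : pvWinner x xs ∈ x :: xs := by
      rcases pvWinner_mem xs x with h | h
      · rw [h]; exact List.mem_cons_self
      · exact List.mem_cons_of_mem _ h
    have hbest : (if (x :: xs).contains "worm" then "worm"
        else (PySem.List.max? (x :: xs) (fun x => x)).getD "") = pvWinner x xs := by
      by_cases hw : "worm" ∈ x :: xs
      · have hwb : (x :: xs).contains "worm" = true := by
          simpa [List.contains_iff_mem] using hw
        rw [if_pos hwb]
        by_contra hne
        have hb : pyBetter "worm" (pvWinner x xs) = true :=
          (pyBetter_iff _ _).mpr (Or.inl ⟨rfl, fun hh => hne hh.symm⟩)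
        rcases List.mem_cons.mp hw with hwx | hwxs
        · rw [hwx] at hb; exact not_better_base xs x hb
        · exact not_better_mem xs x "worm" hwxs hb
      · have hwb : ¬ (x :: xs).contains "worm" = true := by
          simpa [List.contains_iff_mem] using hw
        rw [if_neg hwb]
        obtain ⟨m2, hm2⟩ : ∃ m, PySem.List.max? (x :: xs) (fun x => x) = some m := by
          cases hh : PySem.List.max? (x :: xs) (fun x => x) with
          | none => exact absurd ((PySem.List.max?_eq_none_iff _ _).mp hh) (by simp)
          | some m => exact ⟨m, rfl⟩
        rw [hm2]
        have hm2mem : m2 ∈ x :: xs := PySem.List.max?_mem hm2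
        have hle : pvWinner x xs ≤ m2 := PySem.List.max?_isMax hm2 _ hmemc
        have hnb : ¬ pyBetter m2 (pvWinner x xs) = true := by
          rcases List.mem_cons.mp hm2mem with hx | hxs
          · rw [hx]; exact not_better_base xs x
          · exact not_better_mem xs x m2 hxs
        have hMw : pvWinner x xs ≠ "worm" := by
          intro hEq; rw [hEq] at hmemc; exact hw hmemc
        have hge : m2 ≤ pvWinner x xs := by
          rcases le_or_gt m2 (pvWinner x xs) with hh | hh
          · exact hh
          · exact absurd ((pyBetter_iff _ _).mpr (Or.inr ⟨hMw, hh⟩)) hnb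
        simp [le_antisymm hle hge]
    have hcnt : (if pvWinner x xs = x then (1 : Int) else 0) + (xs.count (pvWinner x xs) : Int)
        = ((x :: xs).count (pvWinner x xs) : Int) := by
      simp only [List.count_cons]
      by_cases hd : pvWinner x xs = x
      · simp [hd]; omega
      · have hd' : ¬ x = pvWinner x xs := fun hh => hd hh.symm
        simp [hd, hd']
    have h0 : (x :: xs).foldl chooseStep (none, 0) = xs.foldl chooseStep (some x, 1) := by
      simp [chooseStep]
    unfold choose_dice_alt pvMid
    rw [h0, foldl_chooseStep xs x 1, if_neg (by simp : ¬ (x :: xs).isEmpty = true), hbest, hcnt]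
    simp [PySem.List.count]

-- the counts dict as a literal association list over the distinct dice
theorem counts_items (roll : List String) :
    ((PySem.Set.ofList roll).foldl
      (fun d die => d.insert die (PySem.List.count roll die : Int)) PySem.Dict.empty).items
    = (PySem.Set.ofList roll).map (fun die => (die, (PySem.List.count roll die : Int))) := by
  have h := PySem.Dict.items_foldl_insert_fresh (l := PySem.Set.ofList roll)
    (k := fun a => a) (v := fun a => (PySem.List.count roll a : Int)) (d := PySem.Dict.empty)
    (by intro a _; simp) (by simp)
  simpa [PySem.Dict.items] using h

theorem counts_keys (roll : List String) :
    ((PySem.Set.ofList roll).foldl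
      (fun d die => d.insert die (PySem.List.count roll die : Int)) PySem.Dict.empty).keys
    = PySem.Set.ofList roll := by
  have h := PySem.Dict.keys_foldl_insert (l := PySem.Set.ofList roll)
    (f := fun d die => (PySem.List.count roll die : Int)) (d := PySem.Dict.empty)
  simpa [PySem.Set.update_nil_left, PySem.Set.ofList_ofList] using h

theorem counts_getD (roll : List String) (v : String) (hv : v ∈ roll) :
    ((PySem.Set.ofList roll).foldl
      (fun d die => d.insert die (PySem.List.count roll die : Int)) PySem.Dict.empty).getD v 0
    = (PySem.List.count roll v : Int) := by
  apply PySem.Dict.getD_of_mem_items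
  · rw [counts_items]
    exact List.mem_map.mpr ⟨v, (PySem.Set.mem_ofList roll v).mpr hv, rfl⟩
  · rw [counts_keys]
    exact PySem.Set.nodup_ofList roll

-- max?, identity key: determined by the members alone
theorem max?_id_unique {xs ys : List String} {m1 m2 : String}
    (hmem : ∀ x, x ∈ xs ↔ x ∈ ys)
    (h1 : PySem.List.max? xs (fun x => x) = some m1)
    (h2 : PySem.List.max? ys (fun x => x) = some m2) : m1 = m2 := by
  have hm1 := PySem.List.max?_mem h1
  have hm2 := PySem.List.max?_mem h2
  have hle1 := PySem.List.max?_isMax h1 m2 ((hmem m2).mpr hm2)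
  have hle2 := PySem.List.max?_isMax h2 m1 ((hmem m1).mp hm1)
  exact le_antisymm hle2 hle1

-- A's dict computation computes pvMid
theorem a_eq_mid (roll : List String) : choose_dice roll = pvMid roll := by
  unfold pvMid choose_dice
  rcases roll.eq_nil_or_concat with hnil | ⟨_, _, hne⟩
  · subst hnil; decide
  · have hroll : roll ≠ [] := by simp [hne]
    have hkeys := counts_keys roll
    have hcontains :
        ((PySem.Set.ofList roll).foldl
          (fun d die => d.insert die (PySem.List.count roll die : Int)) PySem.Dict.empty).contains "worm"
        = roll.contains "worm" := by
      rw [PySem.Dict.contains_eq_decide_mem_keys, hkeys]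
      simp
    by_cases hw : "worm" ∈ roll
    · have hwb : roll.contains "worm" = true := by simpa [List.contains_iff_mem] using hw
      simp only [hcontains, hwb, if_true, counts_getD roll "worm" hw]
      simp [hroll]
    · have hwb : roll.contains "worm" = false := by simpa [List.contains_iff_mem] using hw
      have hsize :
          ((PySem.Set.ofList roll).foldl
            (fun d die => d.insert die (PySem.List.count roll die : Int)) PySem.Dict.empty).size ≠ 0 := by
        have hroll' : PySem.Set.ofList roll ≠ [] := by
          cases roll with
          | nil => exact absurd rfl hroll
          | cons x t => simp [PySem.Set.ofList_cons]
        have hi := counts_items roll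
        simp only [PySem.List.count] at hi
        simp [PySem.Dict.size, hi, List.length_eq_zero_iff, hroll']
      have hfilter :
          (((PySem.Set.ofList roll).foldl
            (fun d die => d.insert die (PySem.List.count roll die : Int)) PySem.Dict.empty).keys.filter
              (fun die => die != "worm"))
          = PySem.Set.ofList roll := by
        rw [hkeys]
        apply List.filter_eq_self.mpr
        intro a ha
        have : a ∈ roll := (PySem.Set.mem_ofList roll a).mp ha
        simp; rintro rfl; exact hw this
      obtain ⟨m2, hm2⟩ : ∃ m, PySem.List.max? roll (fun x => x) = some m := by
        cases h : PySem.List.max? roll (fun x => x) with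
        | none => exact absurd ((PySem.List.max?_eq_none_iff _ _).mp h) hroll
        | some m => exact ⟨m, rfl⟩
      obtain ⟨m1, hm1⟩ : ∃ m, PySem.List.max? (PySem.Set.ofList roll) (fun x => x) = some m := by
        cases h : PySem.List.max? (PySem.Set.ofList roll) (fun x => x) with
        | none =>
          have hnil := (PySem.List.max?_eq_none_iff _ _).mp h
          have : m2 ∈ PySem.Set.ofList roll := (PySem.Set.mem_ofList roll m2).mpr (PySem.List.max?_mem hm2)
          rw [hnil] at this
          exact absurd this (List.not_mem_nil)
        | some m => exact ⟨m, rfl⟩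
      have hmeq : m1 = m2 :=
        max?_id_unique (fun x => PySem.Set.mem_ofList roll x) hm1 hm2
      have hm2mem : m2 ∈ roll := PySem.List.max?_mem hm2
      have hsize' : ¬ ((PySem.Set.ofList roll).foldl
            (fun d die => d.insert die (PySem.List.count roll die : Int)) PySem.Dict.empty).size = 0 := hsize
      simp only [hcontains, hwb, if_false, Bool.false_eq_true, hfilter, hm1,
        List.isEmpty_iff, hroll, hm2, hmeq, counts_getD roll m2 (by exact hm2mem)]
      simp only [PySem.List.count] at hsize' ⊢
      simp [hsize']

-- ===== VERDICT (by name: the statement is the Claim_ definition above) =====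
theorem choose_dice_spec : Claim_equal_choose_dice := by
  intro roll _
  unfold Spec_choose_dice
  rw [a_eq_mid, alt_eq_mid]
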